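-- pv_equiv track=rewrite | github.com/jhwa426/Python | COMPSCI 130/Laboratory/Week11/Lab 18.py | evaluate_g
-- ===== SOURCE A (Python) =====
-- def evaluate_f(num):
--     if num == 0:
--         return 2
-- ##even
--     if num % 2 == 0:
--         result = evaluate_f(num-2) + 3
--         return result
-- ##odd
--     if num % 2 != 0:
--         result = evaluate_g(num) + evaluate_f(num - 1)
--         return result
--
-- def evaluate_g(num):
--     if num == 1:
--         return 3
-- ##even
--     if num % 2 == 0:
--         result = (evaluate_f(num) * evaluate_g(num - 1))
--         return result
-- ##odd
--     if num % 2 != 0: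
--         result = evaluate_g(num - 2) - 2
--         return result
-- ===== SOURCE B (Python) =====
-- def evaluate_g(num):
--     # Closed forms solved from the mutual recurrences:
--     # g(odd n) = 4 - n;  g(even n) = f(n) * g(n-1) = (3n/2 + 2) * (5 - n)
--     if num % 2 != 0:
--         return 4 - num
--     return (num * 3 // 2 + 2) * (5 - num)
-- ===== Notes on version B (the rewrite author's own statement) =====
-- stated objective: faster
-- what changed: Replaced the mutual recursion of evaluate_f/evaluate_g by the closed-form formulas g(odd n)=4-n and g(even n)=(3n/2+2)(5-n) obtained by solving the recurrences.
import Mathlib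
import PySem

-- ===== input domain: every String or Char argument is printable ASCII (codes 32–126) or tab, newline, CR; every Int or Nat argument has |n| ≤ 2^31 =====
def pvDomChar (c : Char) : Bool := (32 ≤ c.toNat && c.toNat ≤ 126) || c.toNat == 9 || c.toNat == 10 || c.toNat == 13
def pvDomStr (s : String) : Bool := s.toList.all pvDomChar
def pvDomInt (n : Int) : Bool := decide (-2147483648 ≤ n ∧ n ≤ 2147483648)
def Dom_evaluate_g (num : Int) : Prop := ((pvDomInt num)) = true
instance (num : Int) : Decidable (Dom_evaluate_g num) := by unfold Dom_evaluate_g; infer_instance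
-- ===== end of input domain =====

-- B replaces A's mutual recursion by the solved closed-form formulas (asymptotically faster);
-- for num ≤ 0 A raises RecursionError, excluded by Pre_ (see Raises_ block).

-- ===== PORT A =====
-- Literal port of the mutually recursive evaluate_f / evaluate_g; the fuel parameter only
-- makes the (for num ≤ 0 non-terminating) recursion total — on Pre_ the fuel is never exhausted.
mutual
def pvFFuel : Nat → Int → Int
  | 0, _ => 0
  | fuel+1, num =>
    if num = 0 then 2
    else if num % 2 = 0 then pvFFuel fuel (num - 2) + 3
    else pvGFuel fuel num + pvFFuel fuel (num - 1)
def pvGFuel : Nat → Int → Int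
  | 0, _ => 0
  | fuel+1, num =>
    if num = 1 then 3
    else if num % 2 = 0 then pvFFuel fuel num * pvGFuel fuel (num - 1)
    else pvGFuel fuel (num - 2) - 2
end

def evaluate_g (num : Int) : Int := pvGFuel (num.toNat + 2) num

-- ===== PORT B =====
def evaluate_g_alt (num : Int) : Int :=
  if num % 2 ≠ 0 then 4 - num
  else (PySem.Int.floordiv (num * 3) 2 + 2) * (5 - num)

-- ===== PRECONDITION & SPEC =====
-- For num ≤ 0 the Python A recurses forever (RecursionError), so Pre_ admits exactly num ≥ 1.
def Pre_evaluate_g (num : Int) : Prop := 1 ≤ num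
instance (num : Int) : Decidable (Pre_evaluate_g num) := by unfold Pre_evaluate_g; infer_instance
def pvWitness_evaluate_g : Int := (5)

def Spec_evaluate_g (num : Int) (out : Int) : Prop := out = evaluate_g_alt num
instance (num : Int) (out : Int) : Decidable (Spec_evaluate_g num out) := by unfold Spec_evaluate_g; infer_instance

-- ===== CLAIM (what is proved, stated in full; the proofs are below) =====
def Claim_equal_evaluate_g : Prop := ∀ (num : Int), Dom_evaluate_g num → Pre_evaluate_g num → Spec_evaluate_g num (evaluate_g num)

-- ===== LEMMAS AND PROOFS =====

-- closed forms of f and g on nonnegative (resp. positive) arguments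
def pvFc (n : Int) : Int := if n % 2 = 0 then 2 + 3 * (n / 2) else 6 - n + 3 * ((n - 1) / 2)
def pvGc (n : Int) : Int := if n % 2 = 0 then (2 + 3 * (n / 2)) * (4 - (n - 1)) else 4 - n

lemma pv_fg_eval : ∀ fuel : Nat,
    (∀ n : Int, 0 ≤ n → (n % 2 = 0 → n.toNat + 2 ≤ 2 * fuel) →
      (n % 2 ≠ 0 → n.toNat + 4 ≤ 2 * fuel) → pvFFuel fuel n = pvFc n) ∧
    (∀ n : Int, 1 ≤ n → n.toNat + 3 ≤ 2 * fuel → pvGFuel fuel n = pvGc n) := by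
  intro fuel
  induction fuel with
  | zero =>
    constructor
    · intro n hn h0 h1
      by_cases h : n % 2 = 0
      · omega
      · have := h1 h; omega
    · intro n hn h; omega
  | succ k ih =>
    obtain ⟨ihf, ihg⟩ := ih
    constructor
    · intro n hn h0 h1
      by_cases hz : n = 0
      · subst hz; simp [pvFFuel, pvFc]
      · by_cases he : n % 2 = 0
        · have hn2 : (2:Int) ≤ n := by omega
          rw [show pvFFuel (k+1) n = pvFFuel k (n - 2) + 3 by simp [pvFFuel, hz, he]]
          rw [ihf (n - 2) (by omega) (by intro _; omega) (by intro h; omega)]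
          simp only [pvFc, if_pos he, if_pos (show (n-2) % 2 = 0 by omega)]
          omega
        · have h4 := h1 he
          rw [show pvFFuel (k+1) n = pvGFuel k n + pvFFuel k (n - 1) by simp [pvFFuel, hz, he]]
          rw [ihg n (by omega) (by omega),
              ihf (n - 1) (by omega) (by intro _; omega) (by intro h; omega)]
          simp only [pvGc, pvFc, if_neg he, if_pos (show (n-1) % 2 = 0 by omega)]
          omega
    · intro n hn h
      by_cases hone : n = 1
      · subst hone; simp [pvGFuel, pvGc]
      · by_cases he : n % 2 = 0
        · have hn2 : (2:Int) ≤ n := by omega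
          rw [show pvGFuel (k+1) n = pvFFuel k n * pvGFuel k (n - 1) by simp [pvGFuel, hone, he]]
          rw [ihf n (by omega) (by intro _; omega) (by intro h; omega),
              ihg (n - 1) (by omega) (by omega)]
          simp only [pvFc, pvGc, if_pos he, if_neg (show ¬((n-1) % 2 = 0) by omega)]
        · have hn3 : (3:Int) ≤ n := by omega
          rw [show pvGFuel (k+1) n = pvGFuel k (n - 2) - 2 by simp [pvGFuel, hone, he]]
          rw [ihg (n - 2) (by omega) (by omega)]
          simp only [pvGc, if_neg he, if_neg (show ¬((n-2) % 2 = 0) by omega)]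
          omega

-- ===== VERDICT (by name: the statement is the Claim_ definition above) =====
theorem evaluate_g_spec : Claim_equal_evaluate_g := by
  intro num _ hpre
  unfold Spec_evaluate_g evaluate_g
  rw [(pv_fg_eval (num.toNat + 2)).2 num hpre (by omega)]
  unfold pvGc evaluate_g_alt
  rw [PySem.Int.floordiv_eq_ediv_of_pos (by omega)]
  by_cases he : num % 2 = 0
  · rw [if_pos he, if_neg (show ¬(num % 2 ≠ 0) by omega)]
    have h3 : num * 3 / 2 = 3 * (num / 2) := by omega
    rw [h3]; ring
  · rw [if_neg he, if_pos he]
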